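-- pv_equiv track=rewrite | github.com/william-lundgren/Lab6 | main_v2.py | has_edge
-- ===== SOURCE A (Python) =====
-- def has_edge(u, v):
--     v = list(v)
--
--     for letter in u[1:]:
--         try:
--             v.remove(letter)
--         except ValueError:
--             continue
--
--     return len(v) == 1
-- ===== SOURCE B (Python) =====
-- def has_edge(u, v):
--     su = sorted(u[1:])
--     sv = sorted(v)
--     i = j = matches = 0
--     while i < len(su) and j < len(sv):
--         if su[i] == sv[j]:
--             matches += 1
--             i += 1
--             j += 1
--         elif su[i] < sv[j]:
--             i += 1
--         else:
--             j += 1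
--     return len(v) - matches == 1
-- ===== Notes on version B (the rewrite author's own statement) =====
-- stated objective: faster
-- what changed: Replaces the repeated linear-scan list.remove removal loop with sorting both sequences once and a two-pointer merge that counts the multiset intersection.
import Mathlib
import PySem

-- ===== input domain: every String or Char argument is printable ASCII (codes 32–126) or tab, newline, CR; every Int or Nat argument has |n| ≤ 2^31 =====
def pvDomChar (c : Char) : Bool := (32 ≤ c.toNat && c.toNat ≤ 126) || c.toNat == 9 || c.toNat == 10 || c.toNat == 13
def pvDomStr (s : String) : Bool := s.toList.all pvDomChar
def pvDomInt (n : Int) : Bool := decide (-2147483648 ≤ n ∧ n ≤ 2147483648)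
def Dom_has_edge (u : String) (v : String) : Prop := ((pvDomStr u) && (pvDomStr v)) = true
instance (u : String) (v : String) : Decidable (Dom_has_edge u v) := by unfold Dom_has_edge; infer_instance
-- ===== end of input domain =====

-- B replaces A's repeated-scan multiset removal by a sort-then-merge intersection count (alternative algorithm, O((m+n) log(m+n)) vs O(m·n)).

-- ===== PORT A =====
-- loop body: v.remove(letter), ValueError swallowed (acc unchanged when letter absent)
def stepA (acc : List Char) (c : Char) : List Char :=
  match PySem.List.remove? acc c with
  | some r => r
  | none => acc

def has_edge (u : String) (v : String) : Bool :=
  let vlist := v.toList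
  let vfinal := (PySem.List.slice u.toList (some 1) none).foldl stepA vlist
  vfinal.length == 1

-- ===== PORT B =====
-- the two-pointer merge of Source B: counts matching positions of the two sorted lists
def mergeCount : List Char → List Char → Nat
  | [], _ => 0
  | _ :: _, [] => 0
  | x :: a, y :: b =>
    if x == y then mergeCount a b + 1
    else if x < y then mergeCount a (y :: b)
    else mergeCount (x :: a) b

def has_edge_alt (u : String) (v : String) : Bool :=
  let su := PySem.List.sorted (PySem.List.slice u.toList (some 1) none) (fun x => x) false
  let sv := PySem.List.sorted v.toList (fun x => x) false
  ((v.toList.length : Int) - (mergeCount su sv : Int)) == 1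

-- ===== PRECONDITION & SPEC =====
def Spec_has_edge (u : String) (v : String) (out : Bool) : Prop := out = has_edge_alt u v
instance (u : String) (v : String) (out : Bool) : Decidable (Spec_has_edge u v out) := by unfold Spec_has_edge; infer_instance

-- ===== CLAIM (what is proved, stated in full; the proofs are below) =====
def Claim_equal_has_edge : Prop := ∀ (u : String) (v : String), Dom_has_edge u v → Spec_has_edge u v (has_edge u v)

-- ===== LEMMAS AND PROOFS =====

lemma stepA_coe (acc : List Char) (c : Char) :
    (↑(stepA acc c) : Multiset Char) = (↑acc : Multiset Char).erase c := by
  by_cases h : c ∈ acc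
  · rw [stepA, PySem.List.remove?_eq_some_erase acc c h]
    simp
  · rw [stepA, (PySem.List.remove?_eq_none_iff acc c).mpr h,
      Multiset.erase_of_notMem (by simpa using h)]

lemma foldA_coe : ∀ (us vs : List Char),
    (↑(us.foldl stepA vs) : Multiset Char) = (↑vs : Multiset Char) - ↑us := by
  intro us
  induction us with
  | nil => intro vs; simp
  | cons c us ih =>
    intro vs
    rw [List.foldl_cons, ih, stepA_coe]
    rw [show ((c :: us : List Char) : Multiset Char) = c ::ₘ (↑us : Multiset Char) from rfl,
      Multiset.sub_cons]

lemma mergeCount_eq (a : List Char) : ∀ (b : List Char),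
    a.Pairwise (· ≤ ·) → b.Pairwise (· ≤ ·) →
    mergeCount a b = Multiset.card ((↑a : Multiset Char) ∩ ↑b) := by
  induction a with
  | nil => intro b _ _; simp [mergeCount]
  | cons x a iha =>
    intro b
    induction b with
    | nil => intro _ _; simp [mergeCount]
    | cons y b ihb =>
      intro ha hb
      obtain ⟨ha1, ha2⟩ := List.pairwise_cons.mp ha
      obtain ⟨hb1, hb2⟩ := List.pairwise_cons.mp hb
      by_cases hxy : x = y
      · subst hxy
        rw [show mergeCount (x :: a) (x :: b) = mergeCount a b + 1 from by
            simp [mergeCount]]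
        rw [iha b ha2 hb2]
        have : ((↑(x :: a) : Multiset Char) ∩ ↑(x :: b)) = x ::ₘ ((↑a : Multiset Char) ∩ ↑b) := by
          rw [show ((x :: a : List Char) : Multiset Char) = x ::ₘ ↑a from rfl,
              show ((x :: b : List Char) : Multiset Char) = x ::ₘ ↑b from rfl,
              Multiset.cons_inter_of_pos _ (Multiset.mem_cons_self x ↑b),
              Multiset.erase_cons_head]
        rw [this, Multiset.card_cons]
      · by_cases hlt : x < y
        · rw [show mergeCount (x :: a) (y :: b) = mergeCount a (y :: b) from by
              simp [mergeCount, hxy, hlt]]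
          have hx : x ∉ ((y :: b : List Char) : Multiset Char) := by
            simp only [Multiset.mem_coe, List.mem_cons]
            rintro (rfl | hmem)
            · exact hxy rfl
            · exact absurd (hb1 _ hmem) (not_le.mpr hlt)
          rw [iha (y :: b) ha2 hb,
            show ((x :: a : List Char) : Multiset Char) = x ::ₘ ↑a from rfl,
            Multiset.cons_inter_of_neg _ hx]
        · rw [show mergeCount (x :: a) (y :: b) = mergeCount (x :: a) b from by
              simp [mergeCount, hxy, hlt]]
          have hy : y ∉ ((x :: a : List Char) : Multiset Char) := by
            have hyx : y < x := lt_of_le_of_ne (not_lt.mp hlt) (fun h => hxy h.symm)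
            simp only [Multiset.mem_coe, List.mem_cons]
            rintro (rfl | hmem)
            · exact hxy rfl
            · exact absurd (ha1 _ hmem) (not_le.mpr hyx)
          have heq : ((x :: a : List Char) : Multiset Char) ∩ ↑(y :: b)
              = ((x :: a : List Char) : Multiset Char) ∩ ↑b := by
            rw [show ((y :: b : List Char) : Multiset Char) = y ::ₘ (↑b : Multiset Char) from rfl,
              Multiset.inter_comm, Multiset.cons_inter_of_neg _ hy, Multiset.inter_comm]
          rw [ihb ha hb2, heq]

-- ===== VERDICT (by name: the statement is the Claim_ definition above) =====
theorem has_edge_spec : Claim_equal_has_edge := by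
  intro u v _
  unfold Spec_has_edge
  simp only [has_edge, has_edge_alt]
  rw [Bool.eq_iff_iff]
  simp only [beq_iff_eq]
  set u' := PySem.List.slice u.toList (some 1) none with hu'
  set su := PySem.List.sorted u' (fun x => x) false with hsu
  set sv := PySem.List.sorted v.toList (fun x => x) false with hsv
  have hA : (u'.foldl stepA v.toList).length
      = Multiset.card ((↑v.toList : Multiset Char) - (↑u' : Multiset Char)) := by
    rw [← Multiset.coe_card, foldA_coe]
  have hcsu : (↑su : Multiset Char) = (↑u' : Multiset Char) :=
    Multiset.coe_eq_coe.mpr (PySem.List.sorted_perm ..)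
  have hcsv : (↑sv : Multiset Char) = (↑v.toList : Multiset Char) :=
    Multiset.coe_eq_coe.mpr (PySem.List.sorted_perm ..)
  have hm : mergeCount su sv
      = Multiset.card ((↑u' : Multiset Char) ∩ (↑v.toList : Multiset Char)) := by
    rw [mergeCount_eq su sv
        (by simpa using PySem.List.sorted_pairwise u' (fun x => x))
        (by simpa using PySem.List.sorted_pairwise v.toList (fun x => x)),
      hcsu, hcsv]
  have hcard : Multiset.card ((↑v.toList : Multiset Char) - (↑u' : Multiset Char))
      + Multiset.card ((↑v.toList : Multiset Char) ∩ (↑u' : Multiset Char)) = v.toList.length := by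
    rw [← Multiset.card_add, Multiset.sub_add_inter, Multiset.coe_card]
  have hcomm : ((↑u' : Multiset Char) ∩ (↑v.toList : Multiset Char))
      = ((↑v.toList : Multiset Char) ∩ (↑u' : Multiset Char)) :=
    Multiset.inter_comm _ _
  rw [hA, hm, hcomm]
  omega
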